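-- pv_equiv track=rewrite | github.com/misc111/Chaos-Index | src/evaluation/validation_stability.py | _status_from_flags
-- ===== SOURCE A (Python) =====
-- def _status_from_flags(flags: list[str]) -> str:
--     critical_markers = {
--         "all_missing",
--         "insufficient_non_missing",
--         "constant",
--         "complete_case_constant",
--         "exact_duplicate",
--         "severe_vif",
--         "severe_pairwise_corr",
--         "critical_condition_cluster",
--     }
--     warning_markers = {
--         "near_constant",
--         "high_vif",
--         "high_pairwise_corr",
--         "warning_condition_cluster",
--     }
--     if any(flag in critical_markers for flag in flags):
--         return "critical"
--     if any(flag in warning_markers for flag in flags):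
--         return "warning"
--     return "ok"
-- ===== SOURCE B (Python) =====
-- def _status_from_flags(flags: list[str]) -> str:
--     critical_markers = {
--         "all_missing",
--         "insufficient_non_missing",
--         "constant",
--         "complete_case_constant",
--         "exact_duplicate",
--         "severe_vif",
--         "severe_pairwise_corr",
--         "critical_condition_cluster",
--     }
--     warning_markers = {
--         "near_constant",
--         "high_vif",
--         "high_pairwise_corr",
--         "warning_condition_cluster",
--     }
--     saw_warning = False
--     for flag in flags:
--         if flag in critical_markers:
--             return "critical"
--         elif flag in warning_markers:
--             saw_warning = True
--     return "warning" if saw_warning else "ok"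
-- ===== Notes on version B (the rewrite author's own statement) =====
-- stated objective: alternative
-- what changed: Replaced A's two separate short-circuit any() scans over the flags list with a single loop that returns 'critical' immediately and tracks a saw_warning boolean, deciding warning/ok after one traversal.
import Mathlib
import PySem

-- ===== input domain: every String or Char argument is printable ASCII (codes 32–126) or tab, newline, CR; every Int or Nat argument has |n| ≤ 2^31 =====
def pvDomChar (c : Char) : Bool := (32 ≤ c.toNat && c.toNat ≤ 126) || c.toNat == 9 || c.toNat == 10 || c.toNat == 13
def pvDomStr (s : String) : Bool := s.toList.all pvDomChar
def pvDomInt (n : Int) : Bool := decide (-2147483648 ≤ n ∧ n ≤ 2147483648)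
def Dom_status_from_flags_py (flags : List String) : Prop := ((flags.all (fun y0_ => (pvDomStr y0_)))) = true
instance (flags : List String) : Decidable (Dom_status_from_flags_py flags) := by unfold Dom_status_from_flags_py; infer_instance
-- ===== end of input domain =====

-- B changes the decomposition only: one loop with a saw_warning flag instead of A's two any() scans; same cost.

-- ===== PORT A =====
def pvCriticalMarkers : PySem.Set String := PySem.Set.ofList
  ["all_missing", "insufficient_non_missing", "constant", "complete_case_constant",
   "exact_duplicate", "severe_vif", "severe_pairwise_corr", "critical_condition_cluster"]

def pvWarningMarkers : PySem.Set String := PySem.Set.ofList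
  ["near_constant", "high_vif", "high_pairwise_corr", "warning_condition_cluster"]

def status_from_flags_py (flags : List String) : String :=
  if flags.any (fun flag => flag ∈ pvCriticalMarkers) then "critical"
  else if flags.any (fun flag => flag ∈ pvWarningMarkers) then "warning"
  else "ok"

-- ===== PORT B =====
def statusLoop : List String → Bool → String
  | [], sawWarning => if sawWarning then "warning" else "ok"
  | flag :: rest, sawWarning =>
      if flag ∈ pvCriticalMarkers then "critical"
      else if flag ∈ pvWarningMarkers then statusLoop rest true
      else statusLoop rest sawWarning

def status_from_flags_py_alt (flags : List String) : String :=
  statusLoop flags false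

-- ===== PRECONDITION & SPEC =====
def Spec_status_from_flags_py (flags : List String) (out : String) : Prop := out = status_from_flags_py_alt flags
instance (flags : List String) (out : String) : Decidable (Spec_status_from_flags_py flags out) := by unfold Spec_status_from_flags_py; infer_instance

-- ===== CLAIM (what is proved, stated in full; the proofs are below) =====
def Claim_equal_status_from_flags_py : Prop := ∀ (flags : List String), Dom_status_from_flags_py flags → Spec_status_from_flags_py flags (status_from_flags_py flags)

-- ===== LEMMAS AND PROOFS =====
theorem statusLoop_eq (flags : List String) (saw : Bool) :
    statusLoop flags saw =
      if flags.any (fun flag => flag ∈ pvCriticalMarkers) then "critical"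
      else if saw || flags.any (fun flag => flag ∈ pvWarningMarkers) then "warning"
      else "ok" := by
  induction flags generalizing saw with
  | nil => simp [statusLoop]
  | cons f rest ih =>
      simp only [statusLoop, List.any_cons]
      by_cases hc : f ∈ pvCriticalMarkers
      · simp [hc]
      · by_cases hw : f ∈ pvWarningMarkers
        · simp [hc, hw, ih]
        · simp [hc, hw, ih]

-- ===== VERDICT (by name: the statement is the Claim_ definition above) =====
theorem status_from_flags_py_spec : Claim_equal_status_from_flags_py := by
  intro flags _
  unfold Spec_status_from_flags_py status_from_flags_py status_from_flags_py_alt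
  rw [statusLoop_eq]
  simp
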